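-- pv_equiv track=rewrite | github.com/chojaelong/CodingTest | code/프로그래머스/전력망을둘로나누기.py | bfs
-- ===== SOURCE A (Python) =====
-- from collections import deque
--
-- def bfs(n, wires):
--     graph = [[] for _ in range(n + 1)]
--     visited = [False] * (n + 1)
--
--     for i, j in wires:
--         graph[i].append(j)
--         graph[j].append(i)
--
--     start = wires[0][0]
--     q = deque([start])
--     visited[start] = True
--
--     while q:
--         node = q.popleft()
--         for n in graph[node]:
--             if not visited[n]:
--                 q.append(n)
--                 visited[n] = True
--
--     y, n = 0, -1
--     for result in visited:
--         if result:
--             y += 1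
--         else:
--             n += 1
--
--     return abs(y - n)
-- ===== SOURCE B (Python) =====
-- def bfs(n, wires):
--     # Union by relabeling: one label array instead of adjacency lists + BFS queue.
--     labels = list(range(n + 1))
--     for i, j in wires:
--         a, b = labels[i], labels[j]
--         if a != b:
--             labels = [b if l == a else l for l in labels]
--     root = labels[wires[0][0]]
--     c = labels.count(root)
--     return abs(2 * c - n)
-- ===== Notes on version B (the rewrite author's own statement) =====
-- stated objective: alternative
-- what changed: Replaces adjacency-list construction plus queue-based BFS with a union-by-relabeling partition: a single label array is merged per wire and the component size is read off by counting the start node's label; the answer becomes the closed form abs(2*c - n).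
import Mathlib
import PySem

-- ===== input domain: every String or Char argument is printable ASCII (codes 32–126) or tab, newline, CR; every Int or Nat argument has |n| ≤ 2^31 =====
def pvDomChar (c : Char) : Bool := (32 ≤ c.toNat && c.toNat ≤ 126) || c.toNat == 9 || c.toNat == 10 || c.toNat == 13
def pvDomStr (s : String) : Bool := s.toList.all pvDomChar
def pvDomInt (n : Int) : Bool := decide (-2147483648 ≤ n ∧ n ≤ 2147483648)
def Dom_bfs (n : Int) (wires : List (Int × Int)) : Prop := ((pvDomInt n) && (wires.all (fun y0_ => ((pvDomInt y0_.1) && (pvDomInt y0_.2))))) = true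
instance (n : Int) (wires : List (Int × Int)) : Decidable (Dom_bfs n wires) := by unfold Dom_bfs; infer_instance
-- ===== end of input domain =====

-- B replaces A's adjacency lists + BFS queue by a union-by-relabeling partition over one label
-- array (alternative decomposition, not claimed faster).  Pre_ excludes exactly the inputs where
-- A raises IndexError (empty wires, or a wire endpoint outside the Python index range [-(n+1), n]).

-- ===== PORT A =====

-- one step of `for n in graph[node]: if not visited[n]: q.append(n); visited[n] = True`
-- (pyGetD's default `true` / pySetD's no-op are reached only where Python raises IndexError,
-- which Pre_bfs excludes)
def bfsInner (vq : List Bool × List Int) (j : Int) : List Bool × List Int :=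
  if PySem.List.pyGetD vq.1 j true then vq
  else (PySem.List.pySetD vq.1 j true, vq.2 ++ [j])

-- (termination helpers for the `while q:` loop: every enqueue flips one False entry to True)
theorem pyIdx?_lt_of_some (nn : Nat) (i : Int) (k : Nat)
    (h : PySem.List.pyIdx? nn i = some k) : k < nn := by
  simp only [PySem.List.pyIdx?] at h
  split_ifs at h <;> simp_all <;> omega

theorem countP_set_false (v : List Bool) (k : Nat) (h : k < v.length) (hv : v[k] = false) :
    (v.set k true).countP (fun b => !b) + 1 = v.countP (fun b => !b) := by
  have hm : false ∈ v := hv ▸ List.getElem_mem h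
  have h1 : 0 < v.countP (fun b => !b) := List.countP_pos_iff.mpr ⟨false, hm, rfl⟩
  rw [List.countP_set]
  · simp [hv]; omega
  · exact h

theorem bfsInner_measure (l : List Int) (v : List Bool) (q : List Int) :
    (l.foldl bfsInner (v, q)).1.countP (fun b => !b) + (l.foldl bfsInner (v, q)).2.length ≤
      v.countP (fun b => !b) + q.length := by
  induction l generalizing v q with
  | nil => simp
  | cons j t ih =>
    simp only [List.foldl_cons, bfsInner]
    by_cases h : PySem.List.pyGetD v j true
    · simpa [h] using ih v q
    · simp only [h, Bool.false_eq_true, if_false]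
      refine le_trans (ih _ _) ?_
      simp only [List.length_append, List.length_singleton]
      cases hk : PySem.List.pyIdx? v.length j with
      | none =>
        exfalso
        apply h
        simp [PySem.List.pyGetD, PySem.List.pyGet?, hk]
      | some k =>
        have hklt : k < v.length := pyIdx?_lt_of_some _ _ _ hk
        have hget : PySem.List.pyGetD v j true = v[k]'hklt := by
          simp [PySem.List.pyGetD, PySem.List.pyGet?, hk, List.getElem?_eq_getElem hklt]
        have hkv : v[k]'hklt = false := by
          rw [← hget]; exact Bool.not_eq_true _ ▸ h
        have hset : PySem.List.pySetD v j true = v.set k true := by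
          simp [PySem.List.pySetD, PySem.List.pySet?, hk]
        rw [hset]
        have := countP_set_false v k hklt hkv
        omega

def bfsLoop (graph : List (List Int)) (visited : List Bool) (q : List Int) : List Bool :=
  match q with
  | [] => visited
  | node :: rest =>
    bfsLoop graph ((PySem.List.pyGetD graph node []).foldl bfsInner (visited, rest)).1
      ((PySem.List.pyGetD graph node []).foldl bfsInner (visited, rest)).2
termination_by visited.countP (fun b => !b) + q.length
decreasing_by
  have := bfsInner_measure (PySem.List.pyGetD graph node []) visited rest
  simp only [List.length_cons]
  omega

-- graph[i].append(j); graph[j].append(i)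
def graphStep (g : List (List Int)) (p : Int × Int) : List (List Int) :=
  let g1 := PySem.List.pySetD g p.1 (PySem.List.pyGetD g p.1 [] ++ [p.2])
  PySem.List.pySetD g1 p.2 (PySem.List.pyGetD g1 p.2 [] ++ [p.1])

def bfs (n : Int) (wires : List (Int × Int)) : Int :=
  let graph0 : List (List Int) := List.replicate (n + 1).toNat []     -- [[] for _ in range(n+1)]
  let visited0 : List Bool := List.replicate (n + 1).toNat false      -- [False] * (n+1)
  let graph := wires.foldl graphStep graph0
  match wires with
  | [] => 0                                                  -- wires[0][0] raises IndexError; outside Pre_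
  | p :: _ =>
    let start := p.1
    let visited1 := PySem.List.pySetD visited0 start true
    let visitedF := bfsLoop graph visited1 [start]
    let counts := visitedF.foldl
      (fun (yk : Int × Int) r => if r then (yk.1 + 1, yk.2) else (yk.1, yk.2 + 1)) (0, -1)
    |counts.1 - counts.2|

-- ===== PORT B =====

-- a, b = labels[i], labels[j]; if a != b: labels = [b if l == a else l for l in labels]
def labelStep (ls : List Int) (p : Int × Int) : List Int :=
  let a := PySem.List.pyGetD ls p.1 0
  let b := PySem.List.pyGetD ls p.2 0
  if a ≠ b then ls.map (fun l => if l = a then b else l) else ls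

def bfs_alt (n : Int) (wires : List (Int × Int)) : Int :=
  let labels0 : List Int := PySem.List.pyRange 0 (n + 1) 1  -- list(range(n+1))
  let labels := wires.foldl labelStep labels0
  match wires with
  | [] => 0                                                  -- wires[0][0] raises IndexError; outside Pre_
  | p :: _ =>
    let root := PySem.List.pyGetD labels p.1 0
    let c : Int := PySem.List.count labels root
    |2 * c - n|

-- ===== PRECONDITION & SPEC =====
-- Pre_ excludes exactly the inputs where the Python A raises IndexError: empty wires
-- (`wires[0][0]`) and wires naming a node outside Python's index range [-(n+1), n].
def Pre_bfs (n : Int) (wires : List (Int × Int)) : Prop :=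
  wires ≠ [] ∧ ∀ p ∈ wires, -(n + 1) ≤ p.1 ∧ p.1 ≤ n ∧ -(n + 1) ≤ p.2 ∧ p.2 ≤ n
instance (n : Int) (wires : List (Int × Int)) : Decidable (Pre_bfs n wires) := by
  unfold Pre_bfs; infer_instance
def pvWitness_bfs : Int × (List (Int × Int)) := (3, [(0, 1), (2, 3)])

def Spec_bfs (n : Int) (wires : List (Int × Int)) (out : Int) : Prop := out = bfs_alt n wires
instance (n : Int) (wires : List (Int × Int)) (out : Int) : Decidable (Spec_bfs n wires out) := by
  unfold Spec_bfs; infer_instance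

-- ===== CLAIM (what is proved, stated in full; the proofs are below) =====
def Claim_equal_bfs : Prop := ∀ (n : Int) (wires : List (Int × Int)),
  Dom_bfs n wires → Pre_bfs n wires → Spec_bfs n wires (bfs n wires)

-- ===== LEMMAS AND PROOFS =====

-- Python's index normalisation for an in-range index, and the graph model
def iota (m : Nat) (v : Int) : Nat := if v < 0 then (v + m).toNat else v.toNat

def Good (m : Nat) (v : Int) : Prop := -(m : Int) ≤ v ∧ v < m

-- a and b (both < m) are the normalised endpoints of some wire
def edg (m : Nat) (wires : List (Int × Int)) (a b : Nat) : Prop :=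
  ∃ p ∈ wires, (iota m p.1 = a ∧ iota m p.2 = b) ∨ (iota m p.1 = b ∧ iota m p.2 = a)

def conn (m : Nat) (wires : List (Int × Int)) : Nat → Nat → Prop :=
  Relation.ReflTransGen (edg m wires)

theorem iota_lt (m : Nat) (v : Int) (h : Good m v) : iota m v < m := by
  obtain ⟨h1, h2⟩ := h; simp only [iota]; split_ifs <;> omega

theorem pyIdx?_good (m : Nat) (v : Int) (h : Good m v) :
    PySem.List.pyIdx? m v = some (iota m v) := by
  obtain ⟨h1, h2⟩ := h
  simp only [PySem.List.pyIdx?, iota]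
  by_cases hv : v < 0
  · have h0 : ¬ (0 ≤ v) := by omega
    simp only [h0, if_false, hv, if_true, h1, if_pos]
    congr 1
    omega
  · simp only [not_lt.mp hv, if_pos, hv, if_false]
    rw [if_pos h2]

theorem pyGetD_iota {α : Type} (xs : List α) (v : Int) (d : α) (h : Good xs.length v) :
    PySem.List.pyGetD xs v d = xs.getD (iota xs.length v) d := by
  have hlt := iota_lt xs.length v h
  simp [PySem.List.pyGetD, PySem.List.pyGet?, pyIdx?_good _ _ h,
    List.getElem?_eq_getElem hlt, List.getD_eq_getElem _ d hlt]

theorem pySetD_iota {α : Type} (xs : List α) (v : Int) (x : α) (h : Good xs.length v) :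
    PySem.List.pySetD xs v x = xs.set (iota xs.length v) x := by
  simp [PySem.List.pySetD, PySem.List.pySet?, pyIdx?_good _ _ h]

theorem getD_set_lt {α : Type} (xs : List α) (k : Nat) (x : α) (a : Nat) (d : α)
    (hk : k < xs.length) :
    (xs.set k x).getD a d = if a = k then x else xs.getD a d := by
  by_cases ha : a < xs.length
  · rw [List.getD_eq_getElem _ d (by simpa using ha), List.getD_eq_getElem _ d ha,
      List.getElem_set]
    rcases eq_or_ne a k with h | h
    · simp [h]
    · rw [if_neg (fun hh => h hh.symm), if_neg h]
  · have hle : xs.length ≤ a := not_lt.mp ha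
    have : ¬ a = k := by omega
    rw [List.getD_eq_default _ _ (by simpa using hle), List.getD_eq_default _ _ hle, if_neg this]

theorem getD_map_lt {α β : Type} (xs : List α) (f : α → β) (a : Nat) (d : α) (d' : β)
    (ha : a < xs.length) : (xs.map f).getD a d' = f (xs.getD a d) := by
  rw [List.getD_eq_getElem _ d' (by simpa using ha), List.getD_eq_getElem _ d ha]
  simp

theorem edg_symm (m : Nat) (wires : List (Int × Int)) (a b : Nat)
    (h : edg m wires a b) : edg m wires b a := by
  obtain ⟨p, hp, h⟩ := h
  exact ⟨p, hp, h.symm⟩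

theorem conn_symm (m : Nat) (wires : List (Int × Int)) (a b : Nat)
    (h : conn m wires a b) : conn m wires b a :=
  Relation.ReflTransGen.symmetric (fun _ _ => edg_symm m wires _ _) h

-- the adjacency lists built by the first loop of A
theorem graphStep_char (m : Nat) (g : List (List Int)) (p : Int × Int)
    (hg : g.length = m) (h1 : Good m p.1) (h2 : Good m p.2) :
    (graphStep g p).length = m ∧
    ∀ a, a < m → ∀ x, x ∈ (graphStep g p).getD a [] ↔
      (x ∈ g.getD a [] ∨ (iota m p.1 = a ∧ x = p.2) ∨ (iota m p.2 = a ∧ x = p.1)) := by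
  subst hg
  have k1 := iota_lt g.length p.1 h1
  have k2 := iota_lt g.length p.2 h2
  simp only [graphStep]
  rw [pyGetD_iota _ _ _ h1, pySetD_iota _ _ _ h1]
  set g1 := g.set (iota g.length p.1) (g.getD (iota g.length p.1) [] ++ [p.2]) with hg1
  have hlen1 : g1.length = g.length := by simp [hg1]
  rw [pyGetD_iota _ _ _ (by rw [hlen1]; exact h2), pySetD_iota _ _ _ (by rw [hlen1]; exact h2),
    hlen1]
  refine ⟨by simp [hg1], fun a ha x => ?_⟩
  rw [getD_set_lt _ _ _ _ _ (by omega), getD_set_lt _ _ _ _ _ (by omega),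
    getD_set_lt _ _ _ _ _ (by omega)]
  by_cases e12 : iota g.length p.1 = iota g.length p.2 <;>
    by_cases e2 : a = iota g.length p.2 <;> by_cases e1 : a = iota g.length p.1 <;>
    simp_all <;> tauto

theorem graph_build (m : Nat) (ws : List (Int × Int)) (g : List (List Int))
    (hg : g.length = m) (hws : ∀ p ∈ ws, Good m p.1 ∧ Good m p.2) :
    (ws.foldl graphStep g).length = m ∧
    ∀ a, a < m → ∀ x, x ∈ (ws.foldl graphStep g).getD a [] ↔
      (x ∈ g.getD a [] ∨ ∃ p ∈ ws, (iota m p.1 = a ∧ x = p.2) ∨ (iota m p.2 = a ∧ x = p.1)) := by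
  induction ws generalizing g with
  | nil => simp [hg]
  | cons p t ih =>
    obtain ⟨hp1, hp2⟩ := hws p (by simp)
    obtain ⟨sl, sc⟩ := graphStep_char m g p hg hp1 hp2
    obtain ⟨il, ic⟩ := ih (graphStep g p) sl (fun q hq => hws q (by simp [hq]))
    refine ⟨il, fun a ha x => ?_⟩
    rw [List.foldl_cons] at *
    rw [ic a ha x, sc a ha x]
    simp only [List.mem_cons]
    constructor
    · rintro ((h | h) | ⟨q, hq, h⟩)
      · exact Or.inl h
      · exact Or.inr ⟨p, Or.inl rfl, h⟩
      · exact Or.inr ⟨q, Or.inr hq, h⟩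
    · rintro (h | ⟨q, (rfl | hq), h⟩)
      · exact Or.inl (Or.inl h)
      · exact Or.inl (Or.inr h)
      · exact Or.inr ⟨q, hq, h⟩

-- the inner `for n in graph[node]` loop
theorem getD_lt_irrel {α : Type} (xs : List α) (a : Nat) (d d' : α) (h : a < xs.length) :
    xs.getD a d = xs.getD a d' := by
  rw [List.getD_eq_getElem _ _ h, List.getD_eq_getElem _ _ h]

theorem inner_char (m : Nat) (l : List Int) (hl : ∀ x ∈ l, Good m x)
    (v : List Bool) (q : List Int) (hv : v.length = m) :
    (l.foldl bfsInner (v, q)).1.length = m ∧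
    (∀ a, v.getD a false = true → (l.foldl bfsInner (v, q)).1.getD a false = true) ∧
    (∀ x ∈ l, (l.foldl bfsInner (v, q)).1.getD (iota m x) false = true) ∧
    (∀ a, (l.foldl bfsInner (v, q)).1.getD a false = true →
      v.getD a false = true ∨ ∃ y ∈ (l.foldl bfsInner (v, q)).2, iota m y = a) ∧
    (∀ y ∈ q, y ∈ (l.foldl bfsInner (v, q)).2) ∧
    (∀ y ∈ (l.foldl bfsInner (v, q)).2, y ∈ q ∨ (y ∈ l ∧ Good m y)) := by
  induction l generalizing v q with
  | nil => exact ⟨hv, fun a h => h, by simp, fun a h => Or.inl h, fun y h => h,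
      fun y h => Or.inl h⟩
  | cons j t ih =>
    have hgj : Good m j := hl j (by simp)
    have hgj' : Good v.length j := hv ▸ hgj
    have hjlt : iota m j < m := iota_lt m j hgj
    have hjlt' : iota v.length j < v.length := by rw [hv]; exact hv ▸ hjlt
    simp only [List.foldl_cons, bfsInner]
    by_cases h : PySem.List.pyGetD v j true
    · -- already visited: state unchanged
      rw [if_pos h]
      obtain ⟨c1, c2, c3, c4, c5, c6⟩ := ih (fun x hx => hl x (by simp [hx])) v q hv
      have hjv : v.getD (iota m j) false = true := by
        rw [pyGetD_iota _ _ _ hgj', hv] at h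
        rw [getD_lt_irrel v _ false true (hv ▸ hjlt)]
        exact h
      exact ⟨c1, c2, fun x hx => by
          rcases List.mem_cons.mp hx with rfl | hx
          · exact c2 _ hjv
          · exact c3 x hx,
        fun a ha => c4 a ha, c5, fun y hy => by
          rcases c6 y hy with h' | ⟨h', hg⟩
          · exact Or.inl h'
          · exact Or.inr ⟨by simp [h'], hg⟩⟩
    · -- unvisited: mark it and enqueue it
      rw [if_neg h]
      rw [pySetD_iota _ _ _ hgj']
      set v' := v.set (iota v.length j) true with hv'
      have hlen' : v'.length = m := by simp [hv', hv]
      have hgetD : ∀ a d, v'.getD a d = if a = iota m j then true else v.getD a d := by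
        intro a d
        rw [hv', getD_set_lt _ _ _ _ _ hjlt', hv]
      obtain ⟨c1, c2, c3, c4, c5, c6⟩ := ih (fun x hx => hl x (by simp [hx])) v' (q ++ [j]) hlen'
      refine ⟨c1, ?_, ?_, ?_, ?_, ?_⟩
      · intro a ha
        exact c2 a (by rw [hgetD]; split_ifs <;> [rfl; exact ha])
      · intro x hx
        rcases List.mem_cons.mp hx with rfl | hx
        · exact c2 _ (by rw [hgetD]; simp)
        · exact c3 x hx
      · intro a ha
        rcases c4 a ha with h' | ⟨y, hy, hiy⟩
        · rw [hgetD] at h'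
          split_ifs at h' with he
          · exact Or.inr ⟨j, c5 j (by simp), he.symm⟩
          · exact Or.inl h'
        · exact Or.inr ⟨y, hy, hiy⟩
      · intro y hy
        exact c5 y (by simp [hy])
      · intro y hy
        rcases c6 y hy with h' | ⟨h', hg⟩
        · rcases List.mem_append.mp h' with h'' | h''
          · exact Or.inl h''
          · exact Or.inr ⟨by simp [List.mem_singleton.mp h''], by
              rw [List.mem_singleton.mp h'']; exact hgj⟩
        · exact Or.inr ⟨by simp [h'], hg⟩

-- the `while q:` loop: the visited array grows monotonically, stays sound for connectivity
-- from s, and on termination is closed under the edge relation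
theorem bfs_char (m : Nat) (wires : List (Int × Int)) (graph : List (List Int)) (s : Nat)
    (Hlen : graph.length = m)
    (Hchar : ∀ a, a < m → ∀ x, x ∈ graph.getD a [] ↔
      ∃ p ∈ wires, (iota m p.1 = a ∧ x = p.2) ∨ (iota m p.2 = a ∧ x = p.1))
    (Hwgood : ∀ p ∈ wires, Good m p.1 ∧ Good m p.2) :
    ∀ (N : Nat) (v : List Bool) (q : List Int),
    v.countP (fun b => !b) + q.length ≤ N →
    v.length = m →
    (∀ y ∈ q, Good m y ∧ v.getD (iota m y) false = true) →
    (∀ a, v.getD a false = true → conn m wires s a) →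
    (∀ a, v.getD a false = true →
      (∃ y ∈ q, iota m y = a) ∨ ∀ b, edg m wires a b → v.getD b false = true) →
    (bfsLoop graph v q).length = m ∧
    (∀ a, v.getD a false = true → (bfsLoop graph v q).getD a false = true) ∧
    (∀ a, (bfsLoop graph v q).getD a false = true → conn m wires s a) ∧
    (∀ a, (bfsLoop graph v q).getD a false = true →
      ∀ b, edg m wires a b → (bfsLoop graph v q).getD b false = true) := by
  intro N
  induction N with
  | zero =>
    intro v q hN hv hq hsound hclosed
    have hq0 : q = [] := by cases q <;> simp_all
    subst hq0
    rw [bfsLoop]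
    refine ⟨hv, fun a h => h, hsound, fun a ha b hb => ?_⟩
    rcases hclosed a ha with ⟨y, hy, _⟩ | hcl
    · simp at hy
    · exact hcl b hb
  | succ N ihN =>
    intro v q hN hv hq hsound hclosed
    cases q with
    | nil =>
      rw [bfsLoop]
      refine ⟨hv, fun a h => h, hsound, fun a ha b hb => ?_⟩
      rcases hclosed a ha with ⟨y, hy, _⟩ | hcl
      · simp at hy
      · exact hcl b hb
    | cons node rest =>
      have hnodeg : Good m node := (hq node (by simp)).1
      have hnlt : iota m node < m := iota_lt m node hnodeg
      have hl_eq : PySem.List.pyGetD graph node [] = graph.getD (iota m node) [] := by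
        rw [pyGetD_iota _ _ _ (Hlen ▸ hnodeg), Hlen]
      have hlgood : ∀ x ∈ graph.getD (iota m node) [], Good m x := by
        intro x hx
        obtain ⟨p, hp, hc⟩ := (Hchar _ hnlt x).mp hx
        rcases hc with ⟨_, rfl⟩ | ⟨_, rfl⟩
        · exact (Hwgood p hp).2
        · exact (Hwgood p hp).1
      have hledg : ∀ x ∈ graph.getD (iota m node) [], edg m wires (iota m node) (iota m x) := by
        intro x hx
        obtain ⟨p, hp, hc⟩ := (Hchar _ hnlt x).mp hx
        rcases hc with ⟨h1, rfl⟩ | ⟨h1, rfl⟩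
        · exact ⟨p, hp, Or.inl ⟨h1, rfl⟩⟩
        · exact ⟨p, hp, Or.inr ⟨rfl, h1⟩⟩
      have hcov : ∀ b, edg m wires (iota m node) b →
          ∃ x ∈ graph.getD (iota m node) [], iota m x = b := by
        intro b hb
        obtain ⟨p, hp, hc⟩ := hb
        rcases hc with ⟨h1, h2⟩ | ⟨h1, h2⟩
        · exact ⟨p.2, (Hchar _ hnlt p.2).mpr ⟨p, hp, Or.inl ⟨h1, rfl⟩⟩, h2⟩
        · exact ⟨p.1, (Hchar _ hnlt p.1).mpr ⟨p, hp, Or.inr ⟨h2, rfl⟩⟩, h1⟩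
      obtain ⟨c1, c2, c3, c4, c5, c6⟩ :=
        inner_char m (graph.getD (iota m node) []) hlgood v rest hv
      have hnodemark : v.getD (iota m node) false = true := (hq node (by simp)).2
      have hmeas := bfsInner_measure (graph.getD (iota m node) []) v rest
      rw [bfsLoop, hl_eq]
      have key := ihN (List.foldl bfsInner (v, rest) (graph.getD (iota m node) [])).1
          (List.foldl bfsInner (v, rest) (graph.getD (iota m node) [])).2
          (by simp only [List.length_cons] at hN; omega)
          c1
          (by
            intro y hy
            rcases c6 y hy with h' | ⟨h', hg⟩
            · exact ⟨(hq y (by simp [h'])).1, c2 _ (hq y (by simp [h'])).2⟩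
            · exact ⟨hg, c3 y h'⟩)
          (by
            intro a ha
            rcases c4 a ha with h' | ⟨y, hy, rfl⟩
            · exact hsound a h'
            · rcases c6 y hy with h' | ⟨h', _⟩
              · exact hsound _ (hq y (by simp [h'])).2
              · exact Relation.ReflTransGen.tail (hsound _ hnodemark) (hledg y h'))
          (by
            intro a ha
            rcases c4 a ha with h' | hpend
            · rcases hclosed a h' with ⟨y, hy, hiy⟩ | hcl
              · rcases List.mem_cons.mp hy with rfl | hy'
                · subst hiy
                  refine Or.inr fun b hb => ?_
                  obtain ⟨x, hx, rfl⟩ := hcov b hb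
                  exact c3 x hx
                · exact Or.inl ⟨y, c5 y hy', hiy⟩
              · exact Or.inr fun b hb => c2 b (hcl b hb)
            · exact Or.inl hpend)
      exact ⟨key.1, fun a ha => key.2.1 a (c2 a ha), key.2.2.1, key.2.2.2⟩

-- the label array: two labels are equal exactly when the nodes are connected
theorem labels_len (ws : List (Int × Int)) (ls : List Int) :
    (ws.foldl labelStep ls).length = ls.length := by
  induction ws generalizing ls with
  | nil => rfl
  | cons p t ih =>
    rw [List.foldl_cons, ih]
    simp only [labelStep]
    split_ifs <;> simp

theorem labelStep_getD (m : Nat) (ls : List Int) (p : Int × Int) (hlen : ls.length = m)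
    (h1 : Good m p.1) (h2 : Good m p.2) (a : Nat) (ha : a < m) :
    (labelStep ls p).getD a 0 =
      if ls.getD a 0 = ls.getD (iota m p.1) 0 then ls.getD (iota m p.2) 0
      else ls.getD a 0 := by
  simp only [labelStep]
  rw [pyGetD_iota _ _ _ (hlen ▸ h1), pyGetD_iota _ _ _ (hlen ▸ h2), hlen]
  split_ifs with hne hc hc
  · rw [getD_map_lt _ _ _ 0 _ (by omega), if_pos hc]
  · rw [getD_map_lt _ _ _ 0 _ (by omega), if_neg hc]
  · rw [hc, not_ne_iff.mp hne]
  · rfl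

theorem labelStep_len (ls : List Int) (p : Int × Int) : (labelStep ls p).length = ls.length := by
  simp only [labelStep]; split_ifs <;> simp

theorem labels_sound (m : Nat) (wires : List (Int × Int)) (ws : List (Int × Int))
    (ls : List Int) (hlen : ls.length = m)
    (hws : ∀ p ∈ ws, p ∈ wires ∧ Good m p.1 ∧ Good m p.2)
    (hinv : ∀ a b, a < m → b < m → ls.getD a 0 = ls.getD b 0 → conn m wires a b) :
    ∀ a b, a < m → b < m →
      (ws.foldl labelStep ls).getD a 0 = (ws.foldl labelStep ls).getD b 0 →
      conn m wires a b := by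
  induction ws generalizing ls with
  | nil => exact hinv
  | cons p t ih =>
    obtain ⟨hpw, hp1, hp2⟩ := hws p (by simp)
    have k1 := iota_lt m p.1 hp1
    have k2 := iota_lt m p.2 hp2
    rw [List.foldl_cons]
    apply ih (labelStep ls p) (by rw [labelStep_len, hlen]) (fun q hq => hws q (by simp [hq]))
    intro a b ha hb heq
    rw [labelStep_getD m ls p hlen hp1 hp2 a ha, labelStep_getD m ls p hlen hp1 hp2 b hb] at heq
    have hedge : conn m wires (iota m p.1) (iota m p.2) :=
      Relation.ReflTransGen.single ⟨p, hpw, Or.inl ⟨rfl, rfl⟩⟩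
    split_ifs at heq with e1 e2 e2
    · exact hinv a b ha hb (e1.trans e2.symm)
    · -- a redirected to class of p.2, b kept: ls b = ls ι2
      exact Relation.ReflTransGen.trans (hinv a _ ha k1 e1)
        (Relation.ReflTransGen.trans hedge (hinv _ b k2 hb heq))
    · exact Relation.ReflTransGen.trans (hinv a _ ha k2 heq)
        (Relation.ReflTransGen.trans (conn_symm _ _ _ _ hedge) (hinv _ b k1 hb e2.symm))
    · exact hinv a b ha hb heq

theorem labels_complete (m : Nat) : ∀ (ws : List (Int × Int))
    (ls : List Int), ls.length = m → (∀ p ∈ ws, Good m p.1 ∧ Good m p.2) →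
    (∀ p ∈ ws, (ws.foldl labelStep ls).getD (iota m p.1) 0 =
      (ws.foldl labelStep ls).getD (iota m p.2) 0) ∧
    (∀ a b, a < m → b < m → ls.getD a 0 = ls.getD b 0 →
      (ws.foldl labelStep ls).getD a 0 = (ws.foldl labelStep ls).getD b 0) := by
  intro ws
  induction ws with
  | nil => exact fun ls _ _ => ⟨by simp, fun a b _ _ h => h⟩
  | cons p t ih =>
    intro ls hlen hws
    obtain ⟨hp1, hp2⟩ := hws p (by simp)
    have k1 := iota_lt m p.1 hp1
    have k2 := iota_lt m p.2 hp2
    have hlen' : (labelStep ls p).length = m := by rw [labelStep_len, hlen]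
    obtain ⟨i1, i2⟩ := ih (labelStep ls p) hlen' (fun q hq => hws q (by simp [hq]))
    have hmerge : (labelStep ls p).getD (iota m p.1) 0 = (labelStep ls p).getD (iota m p.2) 0 := by
      rw [labelStep_getD m ls p hlen hp1 hp2 _ k1, labelStep_getD m ls p hlen hp1 hp2 _ k2]
      rw [if_pos rfl]
      split_ifs <;> rfl
    refine ⟨?_, ?_⟩
    · intro q hq
      rcases List.mem_cons.mp hq with rfl | hq'
      · rw [List.foldl_cons]
        exact i2 _ _ k1 k2 hmerge
      · rw [List.foldl_cons]
        exact i1 q hq'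
    · intro a b ha hb heq
      rw [List.foldl_cons]
      apply i2 _ _ ha hb
      rw [labelStep_getD m ls p hlen hp1 hp2 a ha, labelStep_getD m ls p hlen hp1 hp2 b hb, heq]

-- counting helpers
theorem foldl_yk (V : List Bool) : ∀ (y k : Int),
    V.foldl (fun (yk : Int × Int) r => if r then (yk.1 + 1, yk.2) else (yk.1, yk.2 + 1)) (y, k) =
      (y + V.countP (fun b => b), k + V.countP (fun b => !b)) := by
  induction V with
  | nil => simp
  | cons b t ih =>
    intro y k
    cases b <;> simp [ih, List.countP_cons] <;> ring_nf <;> omega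

theorem countP_congr_idx {α β : Type} : ∀ (xs : List α) (ys : List β)
    (p : α → Bool) (q : β → Bool), xs.length = ys.length →
    (∀ i, (hi : i < xs.length) → (hj : i < ys.length) → p (xs[i]) = q (ys[i])) →
    xs.countP p = ys.countP q := by
  intro xs
  induction xs with
  | nil => intro ys p q h _; cases ys <;> simp_all
  | cons x t ih =>
    intro ys p q h hpt
    cases ys with
    | nil => simp at h
    | cons y u =>
      have h0 := hpt 0 (by simp) (by simp)
      simp only [List.countP_cons, List.getElem_cons_zero] at h0 ⊢
      rw [ih u p q (by simpa using h)
        (fun i hi hj => by simpa using hpt (i + 1) (by simpa using hi) (by simpa using hj)), h0]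

theorem countP_bool_split (V : List Bool) :
    V.countP (fun b => b) + V.countP (fun b => !b) = V.length := by
  induction V with
  | nil => simp
  | cons b t ih => cases b <;> simp [List.countP_cons, ← ih] <;> omega

-- ===== VERDICT (by name: the statement is the Claim_ definition above) =====
theorem bfs_spec : Claim_equal_bfs := by
  intro n wires _ hpre
  obtain ⟨hne, hbound⟩ := hpre
  cases wires with
  | nil => exact absurd rfl hne
  | cons p0 rest =>
    have hb0 := hbound p0 (by simp)
    have hn0 : 0 ≤ n := by omega
    set m := (n + 1).toNat with hmdef
    have hm : (m : Int) = n + 1 := by omega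
    have hwgood : ∀ p ∈ p0 :: rest, Good m p.1 ∧ Good m p.2 := by
      intro p hp
      have := hbound p hp
      exact ⟨⟨by omega, by omega⟩, ⟨by omega, by omega⟩⟩
    have hsgood : Good m p0.1 := (hwgood p0 (by simp)).1
    have hs : iota m p0.1 < m := iota_lt m p0.1 hsgood
    -- A side: the graph and the BFS
    obtain ⟨Hglen, Hgchar0⟩ :=
      graph_build m (p0 :: rest) (List.replicate m []) (by simp) hwgood
    have Hgchar : ∀ a, a < m → ∀ x,
        x ∈ ((p0 :: rest).foldl graphStep (List.replicate m [])).getD a [] ↔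
        ∃ p ∈ p0 :: rest, (iota m p.1 = a ∧ x = p.2) ∨ (iota m p.2 = a ∧ x = p.1) := by
      intro a ha x
      rw [Hgchar0 a ha x]
      simp
    have hv1 : PySem.List.pySetD (List.replicate m false) p0.1 true =
        (List.replicate m false).set (iota m p0.1) true := by
      rw [pySetD_iota _ _ _ (by simpa using hsgood)]
      simp
    have hv1getD : ∀ a, ((List.replicate m false).set (iota m p0.1) true).getD a false = true ↔
        a = iota m p0.1 := by
      intro a
      rw [getD_set_lt _ _ _ _ _ (by simpa using hs)]
      split_ifs with h
      · simp [h]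
      · simp [h, List.getD]
    obtain ⟨d1, d2, d3, d4⟩ := bfs_char m (p0 :: rest)
      ((p0 :: rest).foldl graphStep (List.replicate m [])) (iota m p0.1) Hglen Hgchar hwgood
      (((List.replicate m false).set (iota m p0.1) true).countP (fun b => !b) + 1)
      ((List.replicate m false).set (iota m p0.1) true) [p0.1]
      (by simp)
      (by simpa using hs)
      (by
        intro y hy
        rw [List.mem_singleton] at hy
        subst hy
        exact ⟨hsgood, (hv1getD _).mpr rfl⟩)
      (by
        intro a ha
        rw [(hv1getD a).mp ha]
        exact Relation.ReflTransGen.refl)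
      (by
        intro a ha
        exact Or.inl ⟨p0.1, by simp, ((hv1getD a).mp ha).symm⟩)
    set V := bfsLoop ((p0 :: rest).foldl graphStep (List.replicate m []))
      ((List.replicate m false).set (iota m p0.1) true) [p0.1] with hVdef
    have hVs : V.getD (iota m p0.1) false = true := d2 _ ((hv1getD _).mpr rfl)
    have hViff : ∀ a, V.getD a false = true ↔ conn m (p0 :: rest) (iota m p0.1) a := by
      intro a
      refine ⟨d3 a, fun h => ?_⟩
      induction h with
      | refl => exact hVs
      | tail _ he ih => exact d4 _ ih _ he
    -- B side: the label array
    have hl0 : PySem.List.pyRange 0 (n + 1) 1 = List.map (fun k : Nat => (k : Int)) (List.range m) := by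
      rw [← hm, PySem.List.pyRange_zero_natCast]
    have llen0 : (List.map (fun k : Nat => (k : Int)) (List.range m)).length = m := by simp
    have l0getD : ∀ a, a < m → (List.map (fun k : Nat => (k : Int)) (List.range m)).getD a 0 = (a : Int) := by
      intro a ha
      rw [PySem.List.getD_map_range _ _ _ _ ha]
    have hRlen : ((p0 :: rest).foldl labelStep (List.map (fun k : Nat => (k : Int)) (List.range m))).length
        = m := by rw [labels_len, llen0]
    set R := (p0 :: rest).foldl labelStep (List.map (fun k : Nat => (k : Int)) (List.range m)) with hRdef
    have hRsound : ∀ a b, a < m → b < m → R.getD a 0 = R.getD b 0 → conn m (p0 :: rest) a b := by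
      apply labels_sound m (p0 :: rest) (p0 :: rest) _ llen0
        (fun q hq => ⟨hq, hwgood q hq⟩)
      intro a b ha hb heq
      rw [l0getD a ha, l0getD b hb] at heq
      have : a = b := by exact_mod_cast heq
      subst this
      exact Relation.ReflTransGen.refl
    obtain ⟨i1, _⟩ := labels_complete m (p0 :: rest) _ llen0 hwgood
    have hRconn : ∀ a b, conn m (p0 :: rest) a b → R.getD a 0 = R.getD b 0 := by
      intro a b h
      induction h with
      | refl => rfl
      | tail _ he ih =>
        obtain ⟨p, hp, hc⟩ := he
        rcases hc with ⟨h1, h2⟩ | ⟨h1, h2⟩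
        · rw [ih, ← h1, ← h2]
          exact i1 p hp
        · rw [ih, ← h1, ← h2]
          exact (i1 p hp).symm
    have hroot : PySem.List.pyGetD R p0.1 0 = R.getD (iota m p0.1) 0 := by
      rw [pyGetD_iota _ _ _ (hRlen ▸ hsgood), hRlen]
    -- pointwise agreement of the two characteristic arrays
    have hpt : ∀ i, (hi : i < m) → V[i]'(by omega) = (R[i]'(by omega) == R.getD (iota m p0.1) 0) := by
      intro i hi
      have hVg : V.getD i false = V[i]'(by omega) := List.getD_eq_getElem _ _ (by omega)
      have hRg : R.getD i 0 = R[i]'(by omega) := List.getD_eq_getElem _ _ (by omega)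
      rw [Bool.eq_iff_iff, beq_iff_eq, ← hVg, ← hRg, hViff i]
      constructor
      · intro h
        exact (hRconn _ _ (conn_symm _ _ _ _ h))
      · intro h
        exact conn_symm _ _ _ _ (hRsound _ _ hi hs h)
    have hcount : V.countP (fun b => b) = R.countP (fun l => l == R.getD (iota m p0.1) 0) := by
      apply countP_congr_idx V R _ _ (by omega)
      intro i hi hj
      exact hpt i (by omega)
    -- finish: fold the counters and compare the closed forms
    show bfs n (p0 :: rest) = bfs_alt n (p0 :: rest)
    rw [bfs, bfs_alt]
    simp only [← hmdef, hv1, ← hVdef, hl0, ← hRdef, foldl_yk, hroot]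
    have hcnt : PySem.List.count R (R.getD (iota m p0.1) 0) =
        R.countP (fun l => l == R.getD (iota m p0.1) 0) := rfl
    rw [hcnt, ← hcount]
    have hsplit := countP_bool_split V
    have hVlen : V.length = m := d1
    have harg : (0 : Int) + (V.countP (fun b => b) : Int) -
        (-1 + (V.countP (fun b => !b) : Int)) = 2 * (V.countP (fun b => b) : Int) - n := by
      have : (V.countP (fun b => b) : Int) + (V.countP (fun b => !b) : Int) = (m : Int) := by
        exact_mod_cast hVlen ▸ congrArg Nat.cast hsplit
      omega
    rw [harg]
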